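-- pv_equiv track=rewrite | github.com/utep-cs-systems-courses/s26-os-shell-NenJuJutsu | shell.py | parse_redirections
-- ===== SOURCE A (Python) =====
-- def parse_redirections(tokens: list[str]) -> tuple[list[str], str | None, str | None]:
--     """Parse < infile and > outfile. Returns (argv, infile, outfile)"""
--     argv: list[str] = []
--     infile: str | None = None
--     outfile: str | None = None
--
--     i = 0
--     while i < len(tokens):
--         t = tokens[i]
--         if t == "<":
--             if i + 1 >= len(tokens):
--                 raise ValueError("missing file name after <")
--             infile = tokens[i + 1]
--             i += 2
--         elif t == ">":
--             if i + 1 >= len(tokens):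
--                 raise ValueError("missing file name after >")
--             outfile = tokens[i + 1]
--             i += 2
--         else:
--             argv.append(t)
--             i += 1
--
--     return argv, infile, outfile
-- ===== SOURCE B (Python) =====
-- def parse_redirections(tokens: list[str]) -> tuple[list[str], str | None, str | None]:
--     """Parse < infile and > outfile. Returns (argv, infile, outfile)"""
--     argv: list[str] = []
--     infile: str | None = None
--     outfile: str | None = None
--     pending: str | None = None
--     for t in tokens:
--         if pending is not None:
--             if pending == "<":
--                 infile = t
--             else:
--                 outfile = t
--             pending = None
--         elif t in ("<", ">"):
--             pending = t
--         else:
--             argv.append(t)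
--     if pending is not None:
--         raise ValueError(f"missing file name after {pending}")
--     return argv, infile, outfile
-- ===== Notes on version B (the rewrite author's own statement) =====
-- stated objective: alternative
-- what changed: Replaced the index-based while loop with lookahead-by-two (i += 2 after an operator) by a single for loop over the tokens carrying a 'pending' operator state that assigns the next token and is checked only once after the loop.
import Mathlib
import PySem

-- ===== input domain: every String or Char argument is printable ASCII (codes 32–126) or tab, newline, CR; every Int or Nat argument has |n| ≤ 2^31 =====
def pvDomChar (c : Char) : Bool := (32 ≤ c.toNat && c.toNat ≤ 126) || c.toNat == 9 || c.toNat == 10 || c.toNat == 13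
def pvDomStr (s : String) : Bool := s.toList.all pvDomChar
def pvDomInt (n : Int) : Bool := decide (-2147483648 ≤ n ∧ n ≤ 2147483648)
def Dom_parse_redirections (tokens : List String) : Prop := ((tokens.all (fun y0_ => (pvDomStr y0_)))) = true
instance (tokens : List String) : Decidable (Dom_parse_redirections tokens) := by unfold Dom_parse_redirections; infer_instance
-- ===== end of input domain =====

-- B replaces A's index/lookahead-by-two while loop by a single for loop carrying a 'pending' operator state (objective: alternative decomposition).

-- ===== PORT A =====
-- A's while loop over index i: consuming the token after '<'/'>' together (i += 2)
-- corresponds to matching two elements of the remaining list at once.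
def parseA : List String → List String → Option String → Option String →
    List String × Option String × Option String
  | [], argv, infile, outfile => (argv, infile, outfile)
  | t :: rest, argv, infile, outfile =>
    if t = "<" then
      match rest with
      | [] => (argv, infile, outfile)   -- Python raises ValueError here; excluded by Pre_
      | f :: rest2 => parseA rest2 argv (some f) outfile
    else if t = ">" then
      match rest with
      | [] => (argv, infile, outfile)   -- Python raises ValueError here; excluded by Pre_
      | f :: rest2 => parseA rest2 argv infile (some f)
    else
      parseA rest (argv ++ [t]) infile outfile

def parse_redirections (tokens : List String) : List String × Option String × Option String :=
  parseA tokens [] none none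

-- ===== PORT B =====
-- B's for loop with the remembered expectation `pending`.
def parseB : List String → List String → Option String → Option String → Option String →
    List String × Option String × Option String
  | [], argv, infile, outfile, _pending => (argv, infile, outfile)
      -- Python raises ValueError when _pending ≠ none; excluded by Pre_
  | t :: rest, argv, infile, outfile, pending =>
    match pending with
    | some p =>
      if p = "<" then parseB rest argv (some t) outfile none
      else parseB rest argv infile (some t) none
    | none =>
      if t = "<" ∨ t = ">" then parseB rest argv infile outfile (some t)
      else parseB rest (argv ++ [t]) infile outfile none

def parse_redirections_alt (tokens : List String) : List String × Option String × Option String :=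
  parseB tokens [] none none none

-- ===== PRECONDITION & SPEC =====
def pvIsOp (s : String) : Bool := s == "<" || s == ">"

-- Pre_ excludes exactly the inputs on which A raises ValueError ("missing file name
-- after <//>"), i.e. those whose trailing run of operator tokens has odd length.
def Pre_parse_redirections (tokens : List String) : Prop :=
  (tokens.reverse.takeWhile pvIsOp).length % 2 = 0
instance (tokens : List String) : Decidable (Pre_parse_redirections tokens) := by
  unfold Pre_parse_redirections; infer_instance

def pvWitness_parse_redirections : List String := ["cat", "<", "in.txt", ">", "out.txt"]

def Spec_parse_redirections (tokens : List String) (out : List String × Option String × Option String) : Prop := out = parse_redirections_alt tokens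
instance (tokens : List String) (out : List String × Option String × Option String) : Decidable (Spec_parse_redirections tokens out) := by unfold Spec_parse_redirections; infer_instance

-- ===== CLAIM =====
def Claim_equal_parse_redirections : Prop := ∀ (tokens : List String), Dom_parse_redirections tokens → Pre_parse_redirections tokens → Spec_parse_redirections tokens (parse_redirections tokens)

-- ===== LEMMAS AND PROOFS =====

-- trailing-operator-run length
def RunLen (ts : List String) : Nat := (ts.reverse.takeWhile pvIsOp).length

lemma runlen_cons_nonop (t : String) (l : List String) (h : pvIsOp t = false) :
    RunLen (t :: l) = RunLen l := by
  unfold RunLen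
  rw [List.reverse_cons, List.takeWhile_append]
  split_ifs with h1
  · simp [h, h1]
  · simp

lemma runlen_cons_op_parity (a b : String) (l : List String) (ha : pvIsOp a = true) :
    RunLen (a :: b :: l) % 2 = RunLen l % 2 := by
  unfold RunLen
  rw [List.reverse_cons, List.reverse_cons, List.append_assoc, List.takeWhile_append]
  split_ifs with h1
  · -- l.reverse all ops
    by_cases hb : pvIsOp b = true
    · simp [hb, ha, h1, Nat.add_mod_right]
    · simp [hb, h1]
  · simp

lemma runlen_singleton_op (a : String) (ha : pvIsOp a = true) : RunLen [a] = 1 := by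
  unfold RunLen
  simp [ha]

lemma main_lemma : ∀ (n : Nat) (ts : List String), ts.length ≤ n →
    ∀ argv infile outfile, RunLen ts % 2 = 0 →
    parseA ts argv infile outfile = parseB ts argv infile outfile none := by
  intro n
  induction n with
  | zero =>
    intro ts hlen argv infile outfile _
    have : ts = [] := List.length_eq_zero_iff.mp (Nat.le_zero.mp hlen)
    subst this; rfl
  | succ n ih =>
    intro ts hlen argv infile outfile hpre
    match ts with
    | [] => rfl
    | t :: rest =>
      by_cases hlt : t = "<"
      · subst hlt
        match rest with
        | [] =>
          exfalso
          have := runlen_singleton_op "<" (by decide)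
          rw [this] at hpre; simp at hpre
        | f :: rest2 =>
          have hop : pvIsOp "<" = true := by decide
          have hpre2 : RunLen rest2 % 2 = 0 := by
            rw [← runlen_cons_op_parity "<" f rest2 hop]; exact hpre
          have hlen2 : rest2.length ≤ n := by simp at hlen; omega
          rw [parseA.eq_def, parseB.eq_def]
          simp only []
          simp only [reduceIte]
          rw [parseB.eq_def]
          simp only [reduceIte]
          exact ih rest2 hlen2 argv (some f) outfile hpre2
      · by_cases hgt : t = ">"
        · subst hgt
          match rest with
          | [] =>
            exfalso
            have := runlen_singleton_op ">" (by decide)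
            rw [this] at hpre; simp at hpre
          | f :: rest2 =>
            have hop : pvIsOp ">" = true := by decide
            have hpre2 : RunLen rest2 % 2 = 0 := by
              rw [← runlen_cons_op_parity ">" f rest2 hop]; exact hpre
            have hlen2 : rest2.length ≤ n := by simp at hlen; omega
            rw [parseA.eq_def, parseB.eq_def]
            simp only [reduceIte]
            rw [parseB.eq_def]
            simp only []
            exact ih rest2 hlen2 argv infile (some f) hpre2
        · have hnop : pvIsOp t = false := by
            unfold pvIsOp
            simp [hlt, hgt]
          have hpre2 : RunLen rest % 2 = 0 := by
            rw [← runlen_cons_nonop t rest hnop]; exact hpre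
          have hlen2 : rest.length ≤ n := by simp at hlen; omega
          rw [parseA.eq_def, parseB.eq_def]
          simp only [hlt, hgt, if_false, or_self]
          exact ih rest hlen2 (argv ++ [t]) infile outfile hpre2

-- ===== VERDICT =====
theorem parse_redirections_spec : Claim_equal_parse_redirections := by
  intro tokens _ hpre
  unfold Spec_parse_redirections parse_redirections parse_redirections_alt
  exact main_lemma tokens.length tokens le_rfl [] none none hpre
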